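-- pv_equiv track=rewrite | github.com/cured/advent2023 | 1.2.py | get_digits_from_line
-- ===== SOURCE A (Python) =====
-- replacement_3 = {"one": 1, "two": 2, "six": 6}
--
-- replacement_4 = {"four": 4, "five": 5, "nine": 9}
--
-- replacement_5 = {"three": 3, "seven": 7, "eight": 8}
--
-- def get_digits_from_line(line: str):
--     i = 0
--     list_with_digits = []
--     while i < len(line):
--         three = line[i: i + 3]
--         if three in replacement_3:
--             list_with_digits.append(replacement_3[three])
--             i += 1
--             continue
--         four = line[i: i + 4]
--         if four in replacement_4:
--             list_with_digits.append(replacement_4[four])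
--             i += 1
--             continue
--         five = line[i: i + 5]
--         if five in replacement_5:
--             list_with_digits.append(replacement_5[five])
--             i += 1
--             continue
--
--         if line[i].isdigit():
--             list_with_digits.append(int(line[i]))
--
--         i += 1
--
--     res = int(list_with_digits[0]) * 10 + int(list_with_digits[-1])
--     return res
-- ===== SOURCE B (Python) =====
-- WORDS = {"one": 1, "two": 2, "three": 3, "four": 4, "five": 5,
--          "six": 6, "seven": 7, "eight": 8, "nine": 9}
--
--
-- def _digit_at(line, i):
--     c = line[i]
--     if c.isdigit():
--         return int(c)
--     for w, v in WORDS.items():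
--         if line.startswith(w, i):
--             return v
--     return None
--
--
-- def get_digits_from_line(line: str):
--     first = next(d for i in range(len(line))
--                  if (d := _digit_at(line, i)) is not None)
--     last = next(d for i in reversed(range(len(line)))
--                 if (d := _digit_at(line, i)) is not None)
--     return first * 10 + last
-- ===== Notes on version B (the rewrite author's own statement) =====
-- stated objective: idiomatic
-- what changed: A scans every position with three hand-split 3/4/5-letter dicts and collects all digits into a list before indexing it; B keeps one word->value dict and makes two early-exit directional scans (forward for the first token, backward for the last) with a single per-position test using str.startswith.
import Mathlib
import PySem

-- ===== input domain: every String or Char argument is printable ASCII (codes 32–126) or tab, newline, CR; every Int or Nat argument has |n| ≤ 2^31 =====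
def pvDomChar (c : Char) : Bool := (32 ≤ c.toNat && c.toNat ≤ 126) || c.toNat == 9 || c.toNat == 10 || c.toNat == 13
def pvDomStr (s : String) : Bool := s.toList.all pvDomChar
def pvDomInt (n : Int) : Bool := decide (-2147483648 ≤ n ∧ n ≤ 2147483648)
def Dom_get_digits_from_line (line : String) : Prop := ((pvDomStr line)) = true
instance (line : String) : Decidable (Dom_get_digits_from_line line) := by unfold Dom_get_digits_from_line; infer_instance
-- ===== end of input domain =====

set_option maxHeartbeats 2000000
set_option maxRecDepth 4000

-- B replaces A's full scan (three size-split dicts, a list of all digits, then indexing) by one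
-- word->value table and two early-exit directional scans; the proof is about the return value.

-- ===== PORT A =====
-- replacement_3 membership + lookup applied to line[i:i+3]
def rep3 (s : List Char) : Option Int :=
  if s = (['o', 'n', 'e'] : List Char) then some 1
  else if s = (['t', 'w', 'o'] : List Char) then some 2
  else if s = (['s', 'i', 'x'] : List Char) then some 6
  else none

def rep4 (s : List Char) : Option Int :=
  if s = (['f', 'o', 'u', 'r'] : List Char) then some 4
  else if s = (['f', 'i', 'v', 'e'] : List Char) then some 5
  else if s = (['n', 'i', 'n', 'e'] : List Char) then some 9
  else none

def rep5 (s : List Char) : Option Int :=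
  if s = (['t', 'h', 'r', 'e', 'e'] : List Char) then some 3
  else if s = (['s', 'e', 'v', 'e', 'n'] : List Char) then some 7
  else if s = (['e', 'i', 'g', 'h', 't'] : List Char) then some 8
  else none

-- A's while loop: each iteration inspects the slices line[i:i+3/4/5] of the current suffix,
-- appends at most one digit, and advances i by exactly 1 in every branch; recursion on the
-- suffix is that loop.
def collectA : List Char → List Int
  | [] => []
  | c :: rest =>
    let s := c :: rest
    match rep3 (s.take 3) with
    | some v => v :: collectA rest
    | none =>
      match rep4 (s.take 4) with
      | some v => v :: collectA rest
      | none =>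
        match rep5 (s.take 5) with
        | some v => v :: collectA rest
        | none =>
          if PySem.Chars.isdigit c then ((c.toNat : Int) - 48) :: collectA rest
          else collectA rest

-- res = list_with_digits[0] * 10 + list_with_digits[-1]; pyGet? = none is the IndexError,
-- excluded by Pre_.
def get_digits_from_line (line : String) : Int :=
  let l := collectA line.toList
  (PySem.List.pyGet? l 0).getD 0 * 10 + (PySem.List.pyGet? l (-1)).getD 0

-- ===== PORT B =====
-- Source B's WORDS dict (insertion order)
def wordsB : List (List Char × Int) :=
  [((['o', 'n', 'e'] : List Char), 1), ((['t', 'w', 'o'] : List Char), 2), ((['t', 'h', 'r', 'e', 'e'] : List Char), 3), ((['f', 'o', 'u', 'r'] : List Char), 4),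
   ((['f', 'i', 'v', 'e'] : List Char), 5), ((['s', 'i', 'x'] : List Char), 6), ((['s', 'e', 'v', 'e', 'n'] : List Char), 7), ((['e', 'i', 'g', 'h', 't'] : List Char), 8),
   ((['n', 'i', 'n', 'e'] : List Char), 9)]

-- Source B's _digit_at(line, i), applied to the suffix line[i:] (line.startswith(w, i) is a prefix
-- test of that suffix)
def digitAtB (s : List Char) : Option Int :=
  match s with
  | [] => none
  | c :: _ =>
    if PySem.Chars.isdigit c then some ((c.toNat : Int) - 48)
    else (wordsB.find? (fun p => p.1.isPrefixOf s)).map Prod.snd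

-- forward generator: value at the first position holding a token
def firstB : List Char → Option Int
  | [] => none
  | c :: rest =>
    match digitAtB (c :: rest) with
    | some v => some v
    | none => firstB rest

-- backward generator: every position inside rest comes before position 0 in reversed order
def lastB : List Char → Option Int
  | [] => none
  | c :: rest =>
    match lastB rest with
    | some v => some v
    | none => digitAtB (c :: rest)

def get_digits_from_line_alt (line : String) : Int :=
  match firstB line.toList, lastB line.toList with
  | some f, some l => f * 10 + l
  | _, _ => 0

-- ===== PRECONDITION & SPEC =====
-- token test used only by Pre_ (independent of both ports): a digit or a spelled digit here
def tokPre (s : List Char) : Bool :=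
  (match s.head? with | some c => PySem.Chars.isdigit c | none => false)
  || [(['o', 'n', 'e'] : List Char), ['t', 'w', 'o'], ['t', 'h', 'r', 'e', 'e'], ['f', 'o', 'u', 'r'], ['f', 'i', 'v', 'e'],
      ['s', 'i', 'x'], ['s', 'e', 'v', 'e', 'n'], ['e', 'i', 'g', 'h', 't'], ['n', 'i', 'n', 'e']].any
       (fun w => w.isPrefixOf s)

-- Pre_ excludes exactly the lines holding no digit and no spelled digit one..nine: there A's
-- list_with_digits[0] raises IndexError and B's next(...) raises StopIteration.
def Pre_get_digits_from_line (line : String) : Prop :=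
  ((List.range line.toList.length).any (fun i => tokPre (line.toList.drop i))) = true
instance (line : String) : Decidable (Pre_get_digits_from_line line) := by
  unfold Pre_get_digits_from_line; infer_instance

def pvWitness_get_digits_from_line : String := "xtwone3x"

def Spec_get_digits_from_line (line : String) (out : Int) : Prop := out = get_digits_from_line_alt line
instance (line : String) (out : Int) : Decidable (Spec_get_digits_from_line line out) := by unfold Spec_get_digits_from_line; infer_instance

-- ===== CLAIM (what is proved, stated in full; the proofs are below) =====
def Claim_equal_get_digits_from_line : Prop := ∀ (line : String), Dom_get_digits_from_line line → Pre_get_digits_from_line line → Spec_get_digits_from_line line (get_digits_from_line line)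

-- ===== LEMMAS AND PROOFS =====

theorem take_iff' (l s : List Char) : (List.isPrefixOf l s) = decide (s.take l.length = l) := by
  rcases h : List.isPrefixOf l s with _ | _
  · symm; simp only [decide_eq_false_iff_not]
    intro hc
    have hp : l <+: s := by rw [List.prefix_iff_eq_take, eq_comm, hc]
    rw [← List.isPrefixOf_iff_prefix] at hp
    simp [h] at hp
  · rw [List.isPrefixOf_iff_prefix, List.prefix_iff_eq_take] at h
    simp [← h]

theorem two_three (t : List Char) (h : t.take 4 = ['h', 'r', 'e', 'e']) : t.take 2 = ['h', 'r'] := by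
  have := congrArg (List.take 2) h
  simpa [List.take_take] using this

theorem six_seven (t : List Char) (h : t.take 4 = ['e', 'v', 'e', 'n']) : t.take 2 = ['e', 'v'] := by
  have := congrArg (List.take 2) h
  simpa [List.take_take] using this

-- A's per-position test (its branch order) agrees with B's: the ten token patterns are
-- pairwise non-overlapping (no word is a prefix of another, none starts with a digit).
theorem stepA_eq_digitAtB (s : List Char) :
    (match rep3 (s.take 3) with
     | some v => some v
     | none => match rep4 (s.take 4) with
       | some v => some v
       | none => match rep5 (s.take 5) with
         | some v => some v
         | none =>
           match s with
           | [] => none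
           | c :: _ => if PySem.Chars.isdigit c then some ((c.toNat : Int) - 48) else none) =
    digitAtB s := by
  cases s with
  | nil => decide
  | cons a t =>
    simp only [rep3, rep4, rep5, digitAtB, wordsB, List.find?_cons, List.isPrefixOf_cons₂,
      take_iff', List.take_succ_cons, List.length_cons, List.length_nil]
    norm_num
    split_ifs <;> repeat' split <;>
      simp_all [two_three, six_seven, PySem.Chars.isdigit]

theorem collectA_cons (c : Char) (rest : List Char) :
    collectA (c :: rest) =
      (match digitAtB (c :: rest) with
       | some v => v :: collectA rest
       | none => collectA rest) := by
  rw [← stepA_eq_digitAtB (c :: rest)]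
  simp only [collectA]
  cases h3 : rep3 ((c :: rest).take 3) <;> cases h4 : rep4 ((c :: rest).take 4) <;>
    cases h5 : rep5 ((c :: rest).take 5) <;>
    by_cases hd : PySem.Chars.isdigit c = true <;> simp [h3, h4, h5, hd]

theorem collectA_head (s : List Char) : (collectA s).head? = firstB s := by
  induction s with
  | nil => rfl
  | cons c rest ih =>
    rw [collectA_cons, firstB]
    cases h : digitAtB (c :: rest) <;> simp [h, ih]

theorem collectA_last (s : List Char) : (collectA s).getLast? = lastB s := by
  induction s with
  | nil => rfl
  | cons c rest ih =>
    rw [collectA_cons, lastB]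
    cases h : digitAtB (c :: rest) <;> cases hl : lastB rest <;>
      simp_all [List.getLast?_cons, ih]

theorem any_eq_find?_isSome {α : Type} (p : α → Bool) (l : List α) :
    l.any p = (l.find? p).isSome := by
  induction l with
  | nil => rfl
  | cons a t ih => cases h : p a <;> simp [List.find?_cons, h, ih]

theorem tok_eq (s : List Char) : tokPre s = (digitAtB s).isSome := by
  cases s with
  | nil => decide
  | cons c rest =>
    by_cases hd : PySem.Chars.isdigit c = true <;>
      simp [tokPre, digitAtB, wordsB, hd, ← any_eq_find?_isSome, List.any_cons]

theorem collectA_ne_nil (s : List Char)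
    (h : ∃ i, i < s.length ∧ tokPre (s.drop i) = true) : collectA s ≠ [] := by
  induction s with
  | nil => simp at h
  | cons c rest ih =>
    rw [collectA_cons]
    cases hd : digitAtB (c :: rest) with
    | some v => simp
    | none =>
      obtain ⟨i, hi, ht⟩ := h
      cases i with
      | zero =>
        simp only [List.drop_zero] at ht
        rw [tok_eq, hd] at ht
        simp at ht
      | succ j =>
        exact ih ⟨j, by simpa using hi, by simpa using ht⟩

-- ===== VERDICT (by name: the statement is the Claim_ definition above) =====
theorem get_digits_from_line_spec : Claim_equal_get_digits_from_line := by
  intro line _ hpre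
  unfold Spec_get_digits_from_line
  unfold Pre_get_digits_from_line at hpre
  rw [List.any_eq_true] at hpre
  obtain ⟨i, hi, ht⟩ := hpre
  have hex : ∃ i, i < line.toList.length ∧ tokPre (line.toList.drop i) = true :=
    ⟨i, List.mem_range.mp hi, ht⟩
  have hne := collectA_ne_nil _ hex
  unfold get_digits_from_line get_digits_from_line_alt
  rcases hL : collectA line.toList with _ | ⟨x, xs⟩
  · exact absurd hL hne
  · have hhead : firstB line.toList = some x := by rw [← collectA_head, hL]; rfl
    have hlast : lastB line.toList = some ((x :: xs).getLast (by simp)) := by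
      rw [← collectA_last, hL, List.getLast?_eq_some_getLast]
    simp only [hL, hhead, hlast]
    simp [PySem.List.pyGet?_neg_one]
    rw [List.getLast?_eq_some_getLast]
    rfl
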